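-- pv_equiv track=rewrite | github.com/suvorovrain/adbis_bench | analyse_yago.py | minimize_regex
-- ===== SOURCE A (Python) =====
-- def label_name(index: int) -> str:
--     """
--     0 -> A
--     1 -> B
--     ...
--     25 -> Z
--     26 -> AA
--     27 -> AB
--     """
--     alphabet = "ABCDEFGHIJKLMNOPQRSTUVWXYZ"
--     index += 1
--
--     result = ""
--
--     while index > 0:
--         index -= 1
--         result = alphabet[index % 26] + result
--         index //= 26
--
--     return result
--
-- def minimize_regex(regex_body: str, label_by_predicate: dict[str, str]) -> str:
--     result: list[str] = []
--     i = 0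
--
--     while i < len(regex_body):
--         if regex_body[i] != "<":
--             result.append(regex_body[i])
--             i += 1
--             continue
--
--         j = regex_body.find(">", i + 1)
--
--         if j == -1:
--             raise ValueError(f"bad predicate token in regex: {regex_body!r}")
--
--         predicate = regex_body[i + 1:j]
--
--         if predicate not in label_by_predicate:
--             label_by_predicate[predicate] = label_name(len(label_by_predicate))
--
--         result.append(label_by_predicate[predicate])
--         i = j + 1
--
--     return "".join(result)
-- ===== SOURCE B (Python) =====
-- def label_name(index: int) -> str:
--     """
--     0 -> A
--     1 -> B
--     ...
--     25 -> Z
--     26 -> AA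
--     27 -> AB
--     """
--     alphabet = "ABCDEFGHIJKLMNOPQRSTUVWXYZ"
--     index += 1
--
--     result = ""
--
--     while index > 0:
--         index -= 1
--         result = alphabet[index % 26] + result
--         index //= 26
--
--     return result
--
-- def minimize_regex(regex_body: str, label_by_predicate: dict[str, str]) -> str:
--     # chunk-based scan: slice off literal text up to the next '<' with str.partition,
--     # then slice off the predicate up to its '>', instead of walking indices char by char
--     parts: list[str] = []
--     rest = regex_body
--     while True:
--         literal, opened, rest = rest.partition("<")
--         parts.append(literal)
--         if not opened:
--             break
--         predicate, closed, rest = rest.partition(">")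
--         if not closed:
--             raise ValueError(f"bad predicate token in regex: {regex_body!r}")
--         if predicate not in label_by_predicate:
--             label_by_predicate[predicate] = label_name(len(label_by_predicate))
--         parts.append(label_by_predicate[predicate])
--     return "".join(parts)
-- ===== Notes on version B (the rewrite author's own statement) =====
-- stated objective: idiomatic
-- what changed: Chunk-based scanning with str.partition (slice literal up to next '<', then predicate up to its '>') replaces A's char-by-char index loop with str.find; same dict mutation and left-to-right label assignment.
import Mathlib
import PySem

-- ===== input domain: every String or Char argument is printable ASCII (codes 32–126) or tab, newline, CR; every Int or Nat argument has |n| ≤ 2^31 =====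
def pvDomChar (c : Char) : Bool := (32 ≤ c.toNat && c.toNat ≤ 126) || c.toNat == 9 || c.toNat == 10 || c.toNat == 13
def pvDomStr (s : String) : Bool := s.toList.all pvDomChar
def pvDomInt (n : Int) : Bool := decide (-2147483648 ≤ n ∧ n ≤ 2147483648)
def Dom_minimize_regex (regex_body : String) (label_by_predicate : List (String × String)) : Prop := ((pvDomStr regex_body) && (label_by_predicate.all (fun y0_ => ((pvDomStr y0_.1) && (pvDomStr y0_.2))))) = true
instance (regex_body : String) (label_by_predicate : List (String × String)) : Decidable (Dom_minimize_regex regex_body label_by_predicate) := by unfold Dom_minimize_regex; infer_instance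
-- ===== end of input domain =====

-- B replaces A's char-by-char index walk (str.find for '>') by idiomatic chunk scanning with
-- str.partition; both mutate label_by_predicate identically, the equivalence proved is about the
-- return value.


-- ===== PORT A =====
-- helper label_name (shared verbatim by A and B; B keeps it unchanged)
def pvAlphabet : List Char := "ABCDEFGHIJKLMNOPQRSTUVWXYZ".toList

-- while index > 0: index -= 1; result = alphabet[index % 26] + result; index //= 26
-- (index = len(dict) + 1 is always ≥ 0, so Nat / % match Python's // and %)
def labelLoop : Nat → List Char → List Char
  | 0, acc => acc
  | n + 1, acc => labelLoop (n / 26) (pvAlphabet.getD (n % 26) 'A' :: acc)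
  decreasing_by exact Nat.lt_succ_of_le (Nat.div_le_self n 26)

def label_name (index : Nat) : String := String.ofList (labelLoop (index + 1) [])

-- A's while loop over index i: char-by-char; at '<', find the next '>' by index (regex_body.find)
def goA : List Char → PySem.Dict String String → List Char → String
  | [], _, acc => String.ofList acc
  | c :: rest, d, acc =>
    if c ≠ '<' then goA rest d (acc ++ [c])
    else
      match rest.findIdx? (· == '>') with
      | none => String.ofList acc   -- Python raises ValueError here; excluded by Pre_
      | some j =>
        let pred := String.ofList (rest.take j)
        let d' := if d.contains pred then d else d.insert pred (label_name d.size)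
        goA (rest.drop (j + 1)) d' (acc ++ (d'.getD pred "").toList)
  termination_by l _ _ => l.length
  decreasing_by all_goals simp

def minimize_regex (regex_body : String) (label_by_predicate : List (String × String)) : String :=
  goA regex_body.toList (PySem.Dict.ofList label_by_predicate) []

-- ===== PORT B =====
-- B's while loop: partition the remainder at '<' (takeWhile/dropWhile), then at '>'
def goB (rem : List Char) (d : PySem.Dict String String) (acc : List Char) : String :=
  let lit := rem.takeWhile (· != '<')
  match _h1 : rem.dropWhile (· != '<') with
  | [] => String.ofList (acc ++ lit)                      -- `opened` empty: break, join
  | _ :: afterLt =>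
    let pred := String.ofList (afterLt.takeWhile (· != '>'))
    match _h2 : afterLt.dropWhile (· != '>') with
    | [] => String.ofList []                              -- `closed` empty: B raises ValueError; excluded by Pre_
    | _ :: afterGt =>
      let d' := if d.contains pred then d else d.insert pred (label_name d.size)
      goB afterGt d' (acc ++ lit ++ (d'.getD pred "").toList)
  termination_by rem.length
  decreasing_by
    have t1 := List.length_dropWhile_le (p := (· != '<')) (l := rem)
    have t2 := List.length_dropWhile_le (p := (· != '>')) (l := afterLt)
    rw [_h1] at t1; rw [_h2] at t2; simp at t1 t2; omega

def minimize_regex_alt (regex_body : String) (label_by_predicate : List (String × String)) : String :=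
  goB regex_body.toList (PySem.Dict.ofList label_by_predicate) []

-- ===== PRECONDITION & SPEC =====
-- every '<' in regex_body must be followed (anywhere later) by some '>';
-- otherwise A (and B) raise ValueError("bad predicate token...")
def pvOkLt : List Char → Bool
  | [] => true
  | c :: rest => (c != '<' || rest.contains '>') && pvOkLt rest

def Pre_minimize_regex (regex_body : String) (label_by_predicate : List (String × String)) : Prop :=
  pvOkLt regex_body.toList = true

instance (regex_body : String) (label_by_predicate : List (String × String)) : Decidable (Pre_minimize_regex regex_body label_by_predicate) := by unfold Pre_minimize_regex; infer_instance

def pvWitness_minimize_regex : String × (List (String × String)) :=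
  ("x<isLocatedIn>+y<isLocatedIn>?<hasCapital>", [("dealsWith", "A")])

def Spec_minimize_regex (regex_body : String) (label_by_predicate : List (String × String)) (out : String) : Prop := out = minimize_regex_alt regex_body label_by_predicate
instance (regex_body : String) (label_by_predicate : List (String × String)) (out : String) : Decidable (Spec_minimize_regex regex_body label_by_predicate out) := by unfold Spec_minimize_regex; infer_instance

-- ===== CLAIM (what is proved, stated in full; the proofs are below) =====
def Claim_equal_minimize_regex : Prop := ∀ (regex_body : String) (label_by_predicate : List (String × String)), Dom_minimize_regex regex_body label_by_predicate → Pre_minimize_regex regex_body label_by_predicate → Spec_minimize_regex regex_body label_by_predicate (minimize_regex regex_body label_by_predicate)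

-- ===== LEMMAS AND PROOFS =====

-- goA walks a '<'-free literal prefix one char at a time, appending each to acc
theorem goA_lit (lit : List Char) : ∀ (rest : List Char) (d : PySem.Dict String String) (acc : List Char),
    (∀ c ∈ lit, c ≠ '<') → goA (lit ++ rest) d acc = goA rest d (acc ++ lit) := by
  induction lit with
  | nil => intro rest d acc _; simp
  | cons c lit ih =>
    intro rest d acc h
    have hc : c ≠ '<' := h c (by simp)
    rw [List.cons_append, goA, if_pos hc,
      ih rest d (acc ++ [c]) (fun x hx => h x (by simp [hx]))]
    simp

-- pvOkLt is closed under suffixes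
theorem pvOkLt_suffix (xs : List Char) : ∀ ys, pvOkLt (xs ++ ys) = true → pvOkLt ys = true := by
  induction xs with
  | nil => intro ys h; exact h
  | cons c xs ih =>
    intro ys h
    rw [List.cons_append, pvOkLt] at h
    exact ih ys (by simp at h; exact h.2)

-- the head of a nonempty dropWhile fails the predicate
theorem pvDropWhile_head (p : Char → Bool) : ∀ (l : List Char) (c : Char) (t : List Char),
    l.dropWhile p = c :: t → p c = false := by
  intro l
  induction l with
  | nil => intro c t h; simp at h
  | cons a l ih =>
    intro c t h
    rw [List.dropWhile_cons] at h
    by_cases hp : p a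
    · simp [hp] at h; exact ih c t h
    · simp [hp] at h; rw [← h.1]; simpa using hp

-- findIdx? (· == '>') relates to B's takeWhile/dropWhile split at '>'
theorem findGt_bridge (l : List Char) : ∀ j, l.findIdx? (· == '>') = some j →
    l.takeWhile (· != '>') = l.take j ∧ l.dropWhile (· != '>') = '>' :: l.drop (j + 1) := by
  induction l with
  | nil => intro j h; simp [List.findIdx?_nil] at h
  | cons c t ih =>
    intro j h
    rw [List.findIdx?_cons] at h
    by_cases hc : c = '>'
    · simp [hc] at h
      subst h
      simp [hc]
    · have hcb : (c == '>') = false := by simp [hc]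
      rw [hcb] at h; simp at h
      obtain ⟨j', hj', rfl⟩ := h
      obtain ⟨h1, h2⟩ := ih j' hj'
      constructor
      · simp [hc, h1]
      · simp [hc, h2]

-- main equivalence of the two loops, on inputs every '<' of which is closed by a later '>'
theorem goA_eq_goB : ∀ (n : Nat) (rem : List Char), rem.length ≤ n → pvOkLt rem = true →
    ∀ (d : PySem.Dict String String) (acc : List Char), goA rem d acc = goB rem d acc := by
  intro n
  induction n with
  | zero =>
    intro rem hlen _ d acc
    have : rem = [] := List.eq_nil_of_length_eq_zero (Nat.le_zero.mp hlen)
    subst this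
    rw [goA, goB]
    simp
  | succ n ih =>
    intro rem hlen hok d acc
    have hsplit : rem.takeWhile (· != '<') ++ rem.dropWhile (· != '<') = rem :=
      List.takeWhile_append_dropWhile
    have hlitfree : ∀ c ∈ rem.takeWhile (· != '<'), c ≠ '<' := by
      intro c hc
      simpa using List.mem_takeWhile_imp hc
    have hA := goA_lit (rem.takeWhile (· != '<')) (rem.dropWhile (· != '<')) d acc hlitfree
    rw [hsplit] at hA
    rw [hA, goB]
    split
    · -- break: no '<' left, the whole remainder is literal
      rename_i heq
      rw [heq, goA]
    · -- a '<' was found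
      rename_i c afterLt heq
      have hc : c = '<' := by
        have := pvDropWhile_head (fun x => x != '<') rem c afterLt heq
        simpa using this
      subst hc
      have hokSuf : pvOkLt ('<' :: afterLt) = true := by
        have hre : rem = rem.takeWhile (· != '<') ++ '<' :: afterLt := by
          rw [← heq, hsplit]
        exact pvOkLt_suffix _ _ (hre ▸ hok)
      rw [pvOkLt] at hokSuf
      simp at hokSuf
      obtain ⟨hgt, hokAfter⟩ := hokSuf
      rw [heq, goA.eq_def]
      simp only [ne_eq, not_true_eq_false, if_false]
      cases hf : afterLt.findIdx? (· == '>') with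
      | none =>
        exfalso
        rw [List.findIdx?_eq_none_iff] at hf
        exact absurd (by simp : ('>' == '>') = true) (by simpa using hf '>' hgt)
      | some j =>
        obtain ⟨htw, hdw⟩ := findGt_bridge afterLt j hf
        rw [hdw, htw]
        simp only []
        have hlen' : (afterLt.drop (j + 1)).length ≤ n := by
          have t1 := List.length_dropWhile_le (p := (· != '<')) (l := rem)
          rw [heq] at t1
          have t2 : (List.drop (j + 1) afterLt).length ≤ afterLt.length := by simp
          simp at t1
          omega
        have hok' : pvOkLt (afterLt.drop (j + 1)) = true := by
          have hta : afterLt.take (j + 1) ++ afterLt.drop (j + 1) = afterLt :=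
            List.take_append_drop (j + 1) afterLt
          exact pvOkLt_suffix _ _ (by rw [hta]; exact hokAfter)
        rw [ih (afterLt.drop (j + 1)) hlen' hok']

-- ===== VERDICT (by name: the statement is the Claim_ definition above) =====
theorem minimize_regex_spec : Claim_equal_minimize_regex := by
  intro regex_body label_by_predicate _ hPre
  unfold Spec_minimize_regex minimize_regex minimize_regex_alt
  exact goA_eq_goB regex_body.toList.length regex_body.toList (le_refl _) hPre _ _
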